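-- pv_equiv track=rewrite | github.com/mingovvv/study-2025 | week_01/algorithm/mk.jang/Problem01.py | solution
-- ===== SOURCE A (Python) =====
-- from collections import Counter
--
-- def solution(k, tangerine):
--
--     # 귤의 크기별 갯수 구하기, dictionary
--     size_counter = Counter(tangerine)
--     # 각 원소의 정렬 기준 : x[1]
--     sorted_sizes = sorted(size_counter.items(), key=lambda x: x[1], reverse=True)
--
--     total = 0
--     kind_count = 0
--
--     for size, count in sorted_sizes:
--         total += count
--         kind_count += 1
--         if total >= k:
--             break
--
--     return kind_count
-- ===== SOURCE B (Python) =====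
-- from collections import Counter
--
-- def solution(k, tangerine):
--     # Bucket the distinct-size counts by frequency and jump over whole buckets
--     # arithmetically instead of sorting the (size, count) pairs.
--     n = len(tangerine)
--     buckets = [0] * (n + 1)
--     for c in Counter(tangerine).values():
--         buckets[c] += 1
--     total = 0
--     kinds = 0
--     for c in range(n, 0, -1):
--         m = buckets[c]
--         if m == 0:
--             continue
--         need = k - total
--         j = max(1, -(-need // c))
--         if j <= m:
--             return kinds + j
--         total += c * m
--         kinds += m
--     return kinds
-- ===== Notes on version B (the rewrite author's own statement) =====
-- stated objective: alternative
-- what changed: Replaces A's sort of the (size,count) pairs by a frequency-bucket array over counts, scanned high-to-low with one ceiling-division jump per bucket instead of per-kind accumulation (O(n) vs O(n log n); measured only ~1.4x at the largest size, so not claimed as faster).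
import Mathlib
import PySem

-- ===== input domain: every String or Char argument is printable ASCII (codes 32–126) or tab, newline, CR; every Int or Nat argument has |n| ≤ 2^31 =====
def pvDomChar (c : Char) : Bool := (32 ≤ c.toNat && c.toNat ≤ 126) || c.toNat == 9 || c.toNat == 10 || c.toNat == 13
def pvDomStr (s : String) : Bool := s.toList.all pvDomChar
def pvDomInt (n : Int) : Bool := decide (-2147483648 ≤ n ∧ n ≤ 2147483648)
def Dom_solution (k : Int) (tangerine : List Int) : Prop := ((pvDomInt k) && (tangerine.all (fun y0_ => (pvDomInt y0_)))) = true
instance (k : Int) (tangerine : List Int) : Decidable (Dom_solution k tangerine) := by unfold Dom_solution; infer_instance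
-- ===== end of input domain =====

-- B replaces A's sort of the (size, count) pairs by a frequency-bucket array scanned
-- high-to-low, jumping over each whole bucket with one ceiling division (objective: alternative).

-- ===== PORT A =====
-- the 'for size, count in sorted_sizes' loop with its break (total, kind_count accumulators)
def solutionLoopA (k : Int) : List (Int × Int) → Int → Int → Int
  | [], _, kind_count => kind_count
  | (_, count) :: rest, total, kind_count =>
      if total + count ≥ k then kind_count + 1
      else solutionLoopA k rest (total + count) (kind_count + 1)

def solution (k : Int) (tangerine : List Int) : Int :=
  let size_counter := PySem.Dict.counter tangerine
  let sorted_sizes := PySem.List.sorted size_counter.items (fun x => x.2) true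
  solutionLoopA k sorted_sizes 0 0

-- ===== PORT B =====
-- the 'for c in range(n, 0, -1)' loop of Source B; buckets[c] is read with pyGetD
-- (c is always a count in 1..n, hence in range, so the default is never used)
def solutionLoopB (k : Int) (buckets : List Int) : List Int → Int → Int → Int
  | [], _, kinds => kinds
  | c :: rest, total, kinds =>
      let m := PySem.List.pyGetD buckets c 0
      if m = 0 then solutionLoopB k buckets rest total kinds
      else
        let need := k - total
        let j := max 1 (-(PySem.Int.floordiv (-need) c))
        if j ≤ m then kinds + j
        else solutionLoopB k buckets rest (total + c * m) (kinds + m)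

def solution_alt (k : Int) (tangerine : List Int) : Int :=
  let n : Int := tangerine.length
  -- 'buckets[c] += 1' over the counter's values (each value c satisfies 1 ≤ c ≤ n, in range)
  let buckets := (PySem.Dict.counter tangerine).values.foldl
      (fun bs c => bs.set c.toNat (PySem.List.pyGetD bs c 0 + 1))
      (List.replicate (tangerine.length + 1) 0)
  solutionLoopB k buckets (PySem.List.pyRange n 0 (-1)) 0 0

-- ===== PRECONDITION & SPEC =====
def Spec_solution (k : Int) (tangerine : List Int) (out : Int) : Prop := out = solution_alt k tangerine
instance (k : Int) (tangerine : List Int) (out : Int) : Decidable (Spec_solution k tangerine out) := by unfold Spec_solution; infer_instance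

-- ===== CLAIM (what is proved, stated in full; the proofs are below) =====
def Claim_equal_solution : Prop := ∀ (k : Int) (tangerine : List Int), Dom_solution k tangerine → Spec_solution k tangerine (solution k tangerine)

-- ===== LEMMAS AND PROOFS =====

-- the common core: the greedy loop over the bare list of counts
def loopC (k : Int) : List Int → Int → Int → Int
  | [], _, kc => kc
  | c :: rest, total, kc =>
      if total + c ≥ k then kc + 1
      else loopC k rest (total + c) (kc + 1)

lemma loopA_eq_loopC (k : Int) (ps : List (Int × Int)) : ∀ total kc,
    solutionLoopA k ps total kc = loopC k (ps.map (·.2)) total kc := by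
  induction ps with
  | nil => intro total kc; rfl
  | cons p rest ih =>
      intro total kc
      obtain ⟨s, c⟩ := p
      simp only [solutionLoopA, List.map, loopC]
      split_ifs with h
      · rfl
      · exact ih _ _

-- one whole bucket (m copies of count c) consumed at once by the arithmetic jump
lemma jump (k c : Int) (hc : 0 < c) (m : Nat) (rest : List Int) : ∀ total kinds : Int,
    loopC k (List.replicate m c ++ rest) total kinds =
      if (m : Int) = 0 then loopC k rest total kinds
      else if max 1 (-(PySem.Int.floordiv (-(k - total)) c)) ≤ (m : Int)
        then kinds + max 1 (-(PySem.Int.floordiv (-(k - total)) c))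
        else loopC k rest (total + c * (m : Int)) (kinds + (m : Int)) := by
  induction m with
  | zero => intro total kinds; simp
  | succ m ih =>
      intro total kinds
      have hms : ((m : Int) + 1) ≠ 0 := by omega
      set q := -(PySem.Int.floordiv (-(k - total)) c) with hq
      have hqc : (q - 1) * c < k - total ∧ k - total ≤ q * c :=
        (PySem.Int.neg_floordiv_neg_eq_iff_of_pos hc).mp hq.symm
      simp only [List.replicate_succ, List.cons_append, loopC, Nat.cast_succ, if_neg hms]
      by_cases hbr : total + c ≥ k
      · -- the loop breaks on the first element of the bucket: q ≤ 1, j = 1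
        have hq1 : q ≤ 1 := by nlinarith [hqc.1]
        rw [if_pos hbr, if_pos (by omega : max 1 q ≤ (m : Int) + 1)]
        omega
      · -- q ≥ 2; recurse with need' = need - c, whose ceiling is q - 1
        have hq2 : 2 ≤ q := by nlinarith [hqc.2]
        rw [if_neg hbr, ih]
        have hq' : -(PySem.Int.floordiv (-(k - (total + c))) c) = q - 1 := by
          rw [PySem.Int.neg_floordiv_neg_eq_iff_of_pos hc]
          constructor <;> nlinarith [hqc.1, hqc.2]
        rw [hq']
        by_cases hm0 : (m : Int) = 0
        · rw [if_pos hm0, if_neg (by omega : ¬ max 1 q ≤ (m : Int) + 1)]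
          have : (m : Nat) = 0 := by exact_mod_cast hm0
          subst this
          simp only [Nat.cast_zero] at *
          congr 1
          ring
        · rw [if_neg hm0]
          have hmax : max 1 (q - 1) = q - 1 := by omega
          rw [hmax]
          by_cases hj : q - 1 ≤ (m : Int)
          · rw [if_pos hj, if_pos (by omega : max 1 q ≤ (m : Int) + 1)]
            omega
          · rw [if_neg hj, if_neg (by omega : ¬ max 1 q ≤ (m : Int) + 1)]
            congr 1 <;> ring

-- the bucket fold: each in-range cell holds the count of its index among the folded values
lemma bucket_getD (l : List Int) (hl : ∀ v ∈ l, 1 ≤ v) (c : Int) (hc : 0 < c) :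
    ∀ bs : List Int, c < bs.length →
    PySem.List.pyGetD (l.foldl (fun bs c => bs.set c.toNat (PySem.List.pyGetD bs c 0 + 1)) bs) c 0
      = PySem.List.pyGetD bs c 0 + (l.count c : Int) := by
  induction l with
  | nil => intro bs _; simp
  | cons v l ih =>
      intro bs hlen
      have hv : 1 ≤ v := hl v (by simp)
      have hl' : ∀ x ∈ l, 1 ≤ x := fun x hx => hl x (by simp [hx])
      simp only [List.foldl]
      rw [ih hl' (bs.set v.toNat (PySem.List.pyGetD bs v 0 + 1)) (by simpa using hlen)]
      have hset : PySem.List.pyGetD (bs.set v.toNat (PySem.List.pyGetD bs v 0 + 1)) c 0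
          = PySem.List.pyGetD bs c 0 + (if v = c then 1 else 0) := by
        rw [PySem.List.pyGetD_of_nonneg _ _ (le_of_lt hc),
            PySem.List.pyGetD_of_nonneg _ _ (le_of_lt hc)]
        by_cases hvc : v = c
        · subst hvc
          have hvr : v.toNat < bs.length := by omega
          rw [if_pos rfl, List.getD_eq_getElem _ _ (by simpa using hvr),
              List.getD_eq_getElem _ _ hvr, List.getElem_set_self,
              PySem.List.pyGetD_of_nonneg _ _ (by omega : (0:Int) ≤ v),
              List.getD_eq_getElem _ _ hvr]
        · rw [if_neg hvc]
          have hne : v.toNat ≠ c.toNat := by omega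
          have hcr : c.toNat < bs.length := by omega
          rw [List.getD_eq_getElem _ _ (by simpa using hcr), List.getD_eq_getElem _ _ hcr,
              List.getElem_set_ne hne]
          omega
      rw [hset, List.count_cons]
      by_cases hvc : v = c
      · subst hvc; simp; ring
      · have : ¬ (c == v) = true := by simpa [beq_iff_eq] using fun h => hvc h.symm
        simp [hvc]

-- loop B over a list of candidate counts = loopC over the expanded (grouped) count list
lemma loopB_expand (k : Int) (buckets vals : List Int) :
    ∀ rs : List Int, (∀ c ∈ rs, 0 < c ∧ PySem.List.pyGetD buckets c 0 = (vals.count c : Int)) →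
    ∀ total kinds,
    solutionLoopB k buckets rs total kinds
      = loopC k (rs.flatMap (fun c => List.replicate (vals.count c) c)) total kinds := by
  intro rs
  induction rs with
  | nil => intro _ total kinds; rfl
  | cons c rs ih =>
      intro h total kinds
      obtain ⟨hc, hcnt⟩ := h c (by simp)
      have h' : ∀ c ∈ rs, 0 < c ∧ PySem.List.pyGetD buckets c 0 = ((List.count c vals : Nat) : Int) := fun x hx => h x (List.mem_cons_of_mem _ hx)
      simp only [solutionLoopB, List.flatMap_cons]
      rw [hcnt, jump k c hc (vals.count c) _ total kinds]
      split_ifs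
      · exact ih h' total kinds
      · rfl
      · exact ih h' _ _

-- every value of Counter(t) is the count of a member: between 1 and len t
lemma vals_eq (t : List Int) :
    (PySem.Dict.counter t).values = (PySem.Set.ofList t).map (fun s => ((t.count s : Nat) : Int)) := by
  have : (PySem.Dict.counter t).values = (PySem.Dict.counter t).items.map (·.2) := rfl
  rw [this, PySem.Dict.items_counter, List.map_map]
  rfl

lemma vals_mem_bounds (t : List Int) (v : Int) (hv : v ∈ (PySem.Dict.counter t).values) :
    1 ≤ v ∧ v ≤ t.length := by
  rw [vals_eq] at hv
  obtain ⟨s, hs, rfl⟩ := List.mem_map.mp hv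
  have hmem : s ∈ t := (PySem.Set.mem_ofList _ _).mp hs
  have h1 : 1 ≤ t.count s := List.one_le_count_iff.mpr hmem
  have h2 : t.count s ≤ t.length := List.count_le_length
  omega

-- count of x in the grouped expansion
lemma count_expand (vals : List Int) (rs : List Int) (hnd : rs.Nodup) (x : Int) :
    (rs.flatMap (fun c => List.replicate (vals.count c) c)).count x
      = if x ∈ rs then vals.count x else 0 := by
  induction rs with
  | nil => simp
  | cons c rs ih =>
      have hnd' := (List.nodup_cons.mp hnd).2
      have hcn : c ∉ rs := (List.nodup_cons.mp hnd).1
      simp only [List.flatMap_cons, List.count_append, ih hnd', List.count_replicate]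
      by_cases hxc : x = c
      · subst hxc
        simp [hcn]
      · have : ¬ (c == x) = true := by simpa [beq_iff_eq] using fun h => hxc h.symm
        simp [this, hxc]

-- the expansion over range(n,0,-1) is a permutation of the counter's values
lemma expand_perm (t : List Int) :
    ((PySem.List.pyRange (t.length : Int) 0 (-1)).flatMap
        (fun c => List.replicate ((PySem.Dict.counter t).values.count c) c)).Perm
      (PySem.Dict.counter t).values := by
  rw [List.perm_iff_count]
  intro x
  have hnd : (PySem.List.pyRange (t.length : Int) 0 (-1)).Nodup := by
    rw [PySem.List.pyRange_neg_one_eq_reverse]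
    exact (List.nodup_reverse).mpr (PySem.List.nodup_pyRange_one _ _)
  rw [count_expand _ _ hnd]
  by_cases hx : x ∈ PySem.List.pyRange (t.length : Int) 0 (-1)
  · simp [hx]
  · rw [if_neg hx]
    by_cases hxv : x ∈ (PySem.Dict.counter t).values
    · exfalso
      obtain ⟨h1, h2⟩ := vals_mem_bounds t x hxv
      exact hx (PySem.List.mem_pyRange_neg_one.mpr ⟨by omega, by omega⟩)
    · simp [List.count_eq_zero_of_not_mem hxv]

-- grouped blocks over a strictly decreasing candidate list are nonincreasing
lemma expand_pairwise_gen (vals : List Int) : ∀ rs : List Int, rs.Pairwise (fun a b => b < a) →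
    (rs.flatMap (fun c => List.replicate (vals.count c) c)).Pairwise (fun a b => b ≤ a) := by
  intro rs
  induction rs with
  | nil => intro _; simp
  | cons c rs ih =>
      intro hrs
      rw [List.pairwise_cons] at hrs
      simp only [List.flatMap_cons]
      rw [List.pairwise_append]
      refine ⟨List.pairwise_replicate.mpr (Or.inr le_rfl), ih hrs.2, ?_⟩
      intro a ha b hb
      obtain ⟨d, hd, hb'⟩ := List.mem_flatMap.mp hb
      rw [List.eq_of_mem_replicate ha, List.eq_of_mem_replicate hb']
      exact le_of_lt (hrs.1 d hd)

-- A's sorted count list equals the bucket expansion (same multiset, both nonincreasing)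
lemma csA_eq_csB (t : List Int) :
    (PySem.List.sorted (PySem.Dict.counter t).items (fun x => x.2) true).map (·.2)
      = (PySem.List.pyRange (t.length : Int) 0 (-1)).flatMap
          (fun c => List.replicate ((PySem.Dict.counter t).values.count c) c) := by
  apply PySem.List.eq_of_perm_of_pairwise_le_of_injective (key := fun x : Int => -x)
    (fun a b h => by simpa using h)
  · -- both are permutations of the counter's values
    exact (List.Perm.map (fun p : Int × Int => p.2) (PySem.List.sorted_perm _ _ _)).trans
      (expand_perm t).symm
  · -- A's sorted list is nonincreasing; under key = neg that is Pairwise (≤)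
    have h2 := PySem.List.sorted_pairwise_rev (PySem.Dict.counter t).items (fun x : Int × Int => x.2)
    rw [List.pairwise_map]
    exact h2.imp (by intro a b h; simpa using h)
  · refine (expand_pairwise_gen _ _ ?_).imp (by intro a b h; simpa using h)
    rw [PySem.List.pyRange_neg_one_eq_reverse]
    exact (List.pairwise_reverse).mpr (by simpa using PySem.List.pairwise_lt_pyRange_one ((0:Int)+1) ((t.length:Int)+1))

lemma pyGetD_replicate_zero (n : Nat) (c : Int) (h : 0 ≤ c) :
    PySem.List.pyGetD (List.replicate n (0:Int)) c 0 = 0 := by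
  rw [PySem.List.pyGetD_of_nonneg _ _ h]
  simp [List.getD_eq_getElem?_getD, List.getElem?_replicate]
  split_ifs <;> rfl

-- ===== VERDICT (by name: the statement is the Claim_ definition above) =====
theorem solution_spec : Claim_equal_solution := by
  intro k t _
  unfold Spec_solution solution solution_alt
  rw [loopA_eq_loopC, csA_eq_csB]
  rw [loopB_expand k _ ((PySem.Dict.counter t).values) _ ?_ 0 0]
  intro c hc
  obtain ⟨h0, hn⟩ := PySem.List.mem_pyRange_neg_one.mp hc
  refine ⟨h0, ?_⟩
  rw [bucket_getD _ (fun v hv => (vals_mem_bounds t v hv).1) c h0 _ (by simp; omega),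
      pyGetD_replicate_zero _ _ h0.le, zero_add]
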